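-- pv_equiv track=rewrite | github.com/hassanmahmoud04/CS2006P2 | i_integers_vhardfeatures.py | generate_spanning_set
-- ===== SOURCE A (Python) =====
-- from itertools import combinations  # For generating combinations of elements
--
-- def generate_spanning_set(generators):
--     all_combinations = []  # List to hold all possible combinations of generators
--     product_combo = set()  # Set to hold unique products of combinations
--
--     # Generate combinations for every possible length
--     for r in range(1, len(generators) + 1):
--         all_combinations.extend(combinations(generators, r))  # Add combinations of length r to the list
--     for d in all_combinations:
--         if len(d) > 1:  # If the combination has more than one element
--             product = d[0]  # Start with the first element as the initial product
--             for i in range(1, len(d)):  # Iterate through the rest of the elements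
--                 m = d[i]  # Get the current element
--                 product = product * m  # Multiply the product by the current element
--             product_combo.add(product)  # Add the final product to the set of unique products
--     return product_combo  # Return the set of unique products as the spanning set
-- ===== SOURCE B (Python) =====
-- def generate_spanning_set(generators):
--     n = len(generators)
--     result = set()
--     # layer: (last_index, product) for each current-size combination, in lexicographic order
--     layer = [(i, g) for i, g in enumerate(generators)]
--     for _ in range(2, n + 1):
--         nxt = []
--         for i, p in layer:
--             for j in range(i + 1, n):
--                 q = p * generators[j]
--                 result.add(q)
--                 nxt.append((j, q))
--         layer = nxt
--     return result
-- ===== Notes on version B (the rewrite author's own statement) =====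
-- stated objective: alternative
-- what changed: Instead of materializing all combinations and re-multiplying each from scratch, B builds products layer by layer in lexicographic order, extending each size-r combination's product by one later generator, so each subset product costs one multiplication (fewer multiplications, but both remain exponential in the number of generators).
import Mathlib
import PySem

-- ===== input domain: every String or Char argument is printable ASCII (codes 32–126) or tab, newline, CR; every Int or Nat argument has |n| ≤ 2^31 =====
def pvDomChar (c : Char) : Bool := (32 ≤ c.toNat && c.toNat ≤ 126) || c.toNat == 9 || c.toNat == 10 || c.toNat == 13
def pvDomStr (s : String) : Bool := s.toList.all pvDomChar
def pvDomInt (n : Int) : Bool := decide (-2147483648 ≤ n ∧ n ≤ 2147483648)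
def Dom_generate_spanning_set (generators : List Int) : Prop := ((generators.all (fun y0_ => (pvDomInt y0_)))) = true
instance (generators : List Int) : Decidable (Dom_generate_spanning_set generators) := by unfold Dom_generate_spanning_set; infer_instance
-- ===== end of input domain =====

-- B replaces A's full materialization of all combinations (re-multiplying each from scratch) by a
-- layered lexicographic DP extending each combination's product by one later generator
-- (objective: alternative — one multiplication per subset, though both remain exponential overall).


-- ===== PORT A =====
def generate_spanning_set (generators : List Int) : List Int :=
  let all_combinations : List (List Int) :=
    (PySem.List.pyRange 1 (PySem.List.len generators + 1)).foldl
      (fun all_combinations r => all_combinations ++ PySem.List.combinations generators r.toNat) []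
  all_combinations.foldl
    (fun product_combo d =>
      if 1 < PySem.List.len d then
        PySem.Set.add product_combo
          ((PySem.List.pyRange 1 (PySem.List.len d)).foldl
            (fun product i => product * PySem.List.pyGetD d i 0) (PySem.List.pyGetD d 0 0))
      else product_combo)
    PySem.Set.empty

-- ===== PORT B =====
def generate_spanning_set_alt (generators : List Int) : List Int :=
  let n := PySem.List.len generators
  let layer : List (Int × Int) := PySem.List.enumerate generators
  ((PySem.List.pyRange 2 (n + 1)).foldl
    (fun st _ =>
      st.2.foldl
        (fun st' ip =>
          (PySem.List.pyRange (ip.1 + 1) n).foldl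
            (fun st'' j =>
              let q := ip.2 * PySem.List.pyGetD generators j 0
              (PySem.Set.add st''.1 q, st''.2 ++ [(j, q)]))
            st')
        (st.1, ([] : List (Int × Int))))
    (PySem.Set.empty, layer)).1

-- ===== PRECONDITION & SPEC =====
def Spec_generate_spanning_set (generators : List Int) (out : List Int) : Prop := out = generate_spanning_set_alt generators
instance (generators : List Int) (out : List Int) : Decidable (Spec_generate_spanning_set generators out) := by unfold Spec_generate_spanning_set; infer_instance

-- ===== CLAIM (what is proved, stated in full; the proofs are below) =====
def Claim_equal_generate_spanning_set : Prop := ∀ (generators : List Int), Dom_generate_spanning_set generators → Spec_generate_spanning_set generators (generate_spanning_set generators)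

-- ===== LEMMAS AND PROOFS =====

-- shorthand: generators[j] lookup and the index range [0, len g)
def pvGetD (g : List Int) (j : Int) : Int := PySem.List.pyGetD g j 0
def pvRng (g : List Int) : List Int := PySem.List.pyRange 0 (PySem.List.len g)

-- product of the generators selected by an index combination c (left-to-right, seeded with 1)
def pvProdIdx (g : List Int) (c : List Int) : Int := (c.map (pvGetD g)).foldl (· * ·) 1

-- one layer of B's DP: (last index, product) for every index combination of size r, lexicographic
def pvLayer (g : List Int) (r : Nat) : List (Int × Int) :=
  (PySem.List.combinations (pvRng g) r).map (fun c => (c.getLastD 0, pvProdIdx g c))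

-- B's expansion of a layer
def pvNext (g : List Int) (L : List (Int × Int)) : List (Int × Int) :=
  L.flatMap (fun ip => (PySem.List.pyRange (ip.1 + 1) (PySem.List.len g)).map
    (fun j => (j, ip.2 * pvGetD g j)))

-- the sequence of values B adds to the set over k outer iterations starting from layer L
def pvChain (g : List Int) (L : List (Int × Int)) : Nat → List Int
  | 0 => []
  | k + 1 => (pvNext g L).map Prod.snd ++ pvChain g (pvNext g L) k

-- A's product loop on a nonempty list is foldl (*) seeded with 1
lemma pvProdA_eq (d : List Int) (hd : d ≠ []) :
    (PySem.List.pyRange 1 (PySem.List.len d)).foldl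
      (fun product i => product * PySem.List.pyGetD d i 0) (PySem.List.pyGetD d 0 0)
    = d.foldl (· * ·) 1 := by
  obtain ⟨x, t, rfl⟩ := List.exists_cons_of_ne_nil hd
  rw [PySem.List.foldl_pyRange_pyGetD _ _ _ _ (by norm_num : (0:Int) ≤ 1)]
  simp [PySem.List.pyGetD_ofNat']

-- B's innermost fold, unrolled
lemma pvInnerFold (F : Int → Int) (l : List Int) :
    ∀ (res : List Int) (acc : List (Int × Int)),
    l.foldl (fun st j => (PySem.Set.add st.1 (F j), st.2 ++ [(j, F j)])) (res, acc)
    = ((l.map F).foldl PySem.Set.add res, acc ++ l.map (fun j => (j, F j))) := by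
  induction l with
  | nil => simp
  | cons x t ih => intro res acc; simp [ih]

-- B's middle fold, unrolled
lemma pvStepFold (g : List Int) (L : List (Int × Int)) :
    ∀ (res : List Int) (acc : List (Int × Int)),
    L.foldl
      (fun st' ip =>
        (PySem.List.pyRange (ip.1 + 1) (PySem.List.len g)).foldl
          (fun st'' j =>
            (PySem.Set.add st''.1 (ip.2 * PySem.List.pyGetD g j 0),
             st''.2 ++ [(j, ip.2 * PySem.List.pyGetD g j 0)]))
          st')
      (res, acc)
    = (((pvNext g L).map Prod.snd).foldl PySem.Set.add res, acc ++ pvNext g L) := by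
  induction L with
  | nil => simp [pvNext]
  | cons ip t ih =>
    intro res acc
    simp only [List.foldl_cons,
      pvInnerFold (fun j => ip.2 * PySem.List.pyGetD g j 0), ih, pvNext, pvGetD,
      List.flatMap_cons, List.map_append, List.foldl_append, List.append_assoc, List.map_map,
      Function.comp_def]

-- iterate of the unrolled step
lemma pvIterFold (g : List Int) (l : List Int) :
    ∀ (res : List Int) (L : List (Int × Int)),
    (l.foldl (fun st _ =>
        ((List.map Prod.snd (pvNext g st.2)).foldl PySem.Set.add st.1, pvNext g st.2)) (res, L)).1
    = (pvChain g L l.length).foldl PySem.Set.add res := by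
  induction l with
  | nil => intro res L; simp [pvChain]
  | cons x t ih =>
    intro res L
    simp only [List.foldl_cons, List.length_cons, pvChain, List.foldl_append, ih]

-- B's outer fold, unrolled into pvChain
lemma pvOuterFold (g : List Int) (l : List Int) (res : List Int) (L : List (Int × Int)) :
    (l.foldl
      (fun st _ =>
        st.2.foldl
          (fun st' ip =>
            (PySem.List.pyRange (ip.1 + 1) (PySem.List.len g)).foldl
              (fun st'' j =>
                (PySem.Set.add st''.1 (ip.2 * PySem.List.pyGetD g j 0),
                 st''.2 ++ [(j, ip.2 * PySem.List.pyGetD g j 0)]))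
              st')
          (st.1, ([] : List (Int × Int))))
      (res, L)).1
    = (pvChain g L l.length).foldl PySem.Set.add res := by
  have hstep : (fun (st : List Int × List (Int × Int)) (_ : Int) =>
      st.2.foldl
        (fun st' ip =>
          (PySem.List.pyRange (ip.1 + 1) (PySem.List.len g)).foldl
            (fun st'' j =>
              (PySem.Set.add st''.1 (ip.2 * PySem.List.pyGetD g j 0),
               st''.2 ++ [(j, ip.2 * PySem.List.pyGetD g j 0)]))
            st')
        (st.1, ([] : List (Int × Int))))
      = (fun st _ =>
        ((List.map Prod.snd (pvNext g st.2)).foldl PySem.Set.add st.1, pvNext g st.2)) := by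
    funext st x
    rw [pvStepFold]
    simp
  rw [hstep, pvIterFold]

-- index ranges are strictly increasing
lemma pvRng_pairwise (g : List Int) : (pvRng g).Pairwise (· < ·) :=
  PySem.List.pairwise_lt_pyRange_one 0 (PySem.List.len g)

-- filtering an index range by (i < ·) is the tail range
lemma pvFilter_rng (n : Int) (i : Int) (h0 : 0 ≤ i) :
    (PySem.List.pyRange 0 n).filter (fun j => decide (i < j))
    = PySem.List.pyRange (i + 1) n := by
  by_cases h : i + 1 ≤ n
  · rw [PySem.List.pyRange_one_append 0 (i+1) n (by omega) h, List.filter_append,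
      List.filter_eq_nil_iff.mpr (by intro a ha; rw [PySem.List.mem_pyRange_one] at ha; simp; omega),
      List.filter_eq_self.mpr (by intro a ha; rw [PySem.List.mem_pyRange_one] at ha; simp; omega),
      List.nil_append]
  · rw [PySem.List.pyRange_one_eq_nil (by omega : n ≤ i + 1),
      List.filter_eq_nil_iff.mpr (by intro a ha; rw [PySem.List.mem_pyRange_one] at ha; simp; omega)]

-- CORE: lexicographic (r+2)-combinations = (r+1)-combinations, each extended by a later element
lemma pvGetLastD_ne {c : List Int} (hc : c ≠ []) (d e : Int) : c.getLastD d = c.getLastD e := by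
  rw [List.getLastD_eq_getLast?, List.getLastD_eq_getLast?,
    List.getLast?_eq_some_getLast hc]
  rfl

lemma pvGetLastD_mem {c : List Int} (hc : c ≠ []) (d : Int) : c.getLastD d ∈ c := by
  rw [List.getLastD_eq_getLast?, List.getLast?_eq_some_getLast hc]
  exact List.getLast_mem hc

lemma pvNonempty_of_mem_comb {xs c : List Int} {r : Nat}
    (h : c ∈ PySem.List.combinations xs (r + 1)) : c ≠ [] := by
  have := PySem.List.length_of_mem_combinations h
  intro hc; subst hc; simp at this

lemma pvExtCore (xs : List Int) (hx : xs.Pairwise (· < ·)) : ∀ (r : Nat),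
    PySem.List.combinations xs (r + 2)
    = (PySem.List.combinations xs (r + 1)).flatMap
        (fun c => (xs.filter (fun j => decide (c.getLastD 0 < j))).map (fun j => c ++ [j])) := by
  induction xs with
  | nil => intro r; simp [PySem.List.combinations_nil_succ]
  | cons x t ih =>
    have hlt : ∀ y ∈ t, x < y := (List.pairwise_cons.mp hx).1
    have ht : t.Pairwise (· < ·) := (List.pairwise_cons.mp hx).2
    intro r
    rw [PySem.List.combinations_cons_succ x t (r + 1), PySem.List.combinations_cons_succ x t r,
      List.flatMap_append, List.flatMap_map]
    have part2 : (PySem.List.combinations t (r + 1)).flatMap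
        (fun c => ((x :: t).filter (fun j => decide (c.getLastD 0 < j))).map (fun j => c ++ [j]))
        = PySem.List.combinations t (r + 2) := by
      rw [List.flatMap_congr (g := fun c =>
            (t.filter (fun j => decide (c.getLastD 0 < j))).map (fun j => c ++ [j]))
          (by
            intro c hc
            have hcne := pvNonempty_of_mem_comb hc
            have hmem : c.getLastD 0 ∈ t :=
              (PySem.List.sublist_of_mem_combinations hc).mem (pvGetLastD_mem hcne 0)
            have h2 : ¬ (c.getLastD 0 < x) := not_lt.mpr (le_of_lt (hlt _ hmem))
            have h3 : ¬ (c.getLast?.getD 0 < x) := by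
              rw [← List.getLastD_eq_getLast?]; exact h2
            simp [h3]),
        ih ht r]
    rw [part2]
    congr 1
    -- part1
    cases r with
    | zero =>
      simp only [PySem.List.combinations_zero, List.flatMap_cons, List.flatMap_nil,
        List.append_nil]
      have hgl : ((x :: ([] : List Int)).getLastD 0) = x := rfl
      rw [hgl, List.filter_cons, if_neg (by simp)]
      rw [List.filter_eq_self.mpr (by intro a ha; simp [hlt a ha]),
        PySem.List.combinations_one, List.map_map]
      simp [Function.comp_def]
    | succ s =>
      rw [ih ht s, List.map_flatMap]
      apply List.flatMap_congr
      intro c hc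
      have hcne := pvNonempty_of_mem_comb hc
      have hl1 : (x :: c).getLastD 0 = c.getLastD 0 := by
        rw [List.getLastD_cons]; exact pvGetLastD_ne hcne x 0
      have hmem : c.getLastD 0 ∈ t :=
        (PySem.List.sublist_of_mem_combinations hc).mem (pvGetLastD_mem hcne 0)
      have hnx : ¬ (c.getLastD 0 < x) := not_lt.mpr (le_of_lt (hlt _ hmem))
      have hnx' : ¬ (c.getLast?.getD 0 < x) := by
        rw [← List.getLastD_eq_getLast?]; exact hnx
      rw [hl1, List.filter_cons]
      simp only [List.getLastD_eq_getLast?, decide_eq_true_eq, if_neg hnx', List.map_map]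
      rfl


-- one DP step advances the layer
lemma pvLayer_succ (g : List Int) (r : Nat) :
    pvNext g (pvLayer g (r + 1)) = pvLayer g (r + 2) := by
  rw [pvNext, pvLayer, List.flatMap_map, pvLayer, pvExtCore (pvRng g) (pvRng_pairwise g) r,
    List.map_flatMap]
  apply List.flatMap_congr
  intro c hc
  have hcne := pvNonempty_of_mem_comb hc
  have hmem : c.getLastD 0 ∈ pvRng g :=
    (PySem.List.sublist_of_mem_combinations hc).mem (pvGetLastD_mem hcne 0)
  have h0 : 0 ≤ c.getLastD 0 := (PySem.List.mem_pyRange_one.mp hmem).1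
  rw [pvRng] at *
  rw [← pvFilter_rng (PySem.List.len g) (c.getLastD 0) h0, List.map_map]
  apply List.map_congr_left
  intro j hj
  simp only [Function.comp_def, List.getLastD_concat]
  rw [pvProdIdx, pvProdIdx, List.map_append, List.foldl_append]
  rfl

-- the chain starting at layer (r+1) lists the products of layers r+2, r+3, …
lemma pvChain_layer (g : List Int) :
    ∀ (k r : Nat), pvChain g (pvLayer g (r + 1)) k
      = (List.range k).flatMap (fun t => (pvLayer g (r + 2 + t)).map Prod.snd) := by
  intro k
  induction k with
  | zero => intro r; simp [pvChain]
  | succ k ih =>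
    intro r
    rw [pvChain, pvLayer_succ, List.range_succ_eq_map]
    simp only [List.flatMap_cons, Nat.add_zero, List.flatMap_map, ih (r + 1)]
    congr 2
    funext t
    congr 2
    omega

-- the generators list is its own index range mapped through lookup
lemma pvG_eq (g : List Int) : g = (pvRng g).map (pvGetD g) :=
  (PySem.List.map_pyGetD_pyRange_zero g 0).symm

-- B's initial layer is pvLayer 1
lemma pvEnumerate_eq (g : List Int) : PySem.List.enumerate g = pvLayer g 1 := by
  rw [pvLayer, PySem.List.combinations_one, List.map_map, PySem.List.enumerate_eq_map_pyRange g 0]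
  simp [pvRng, pvProdIdx, pvGetD, Function.comp_def]

-- A's product loop, named
def pvProdA (d : List Int) : Int :=
  (PySem.List.pyRange 1 (PySem.List.len d)).foldl
    (fun product i => product * PySem.List.pyGetD d i 0) (PySem.List.pyGetD d 0 0)

-- the products A adds for combinations of size r, in order
def pvSeqA (g : List Int) (r : Nat) : List Int :=
  ((PySem.List.combinations g r).filter (fun d => decide (1 < PySem.List.len d))).map pvProdA

-- A's conditional fold is a plain Set.add fold over the filtered products
lemma pvFoldIf (l : List (List Int)) : ∀ (s : PySem.Set Int),
    l.foldl (fun product_combo d =>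
      if 1 < PySem.List.len d then PySem.Set.add product_combo (pvProdA d) else product_combo) s
    = ((l.filter (fun d => decide (1 < PySem.List.len d))).map pvProdA).foldl PySem.Set.add s := by
  induction l with
  | nil => intro s; rfl
  | cons d t ih =>
    intro s
    rw [List.foldl_cons, List.filter_cons]
    by_cases h : 1 < PySem.List.len d
    · rw [if_pos h, if_pos (by simpa using h), List.map_cons, List.foldl_cons, ih]
    · rw [if_neg h, if_neg (by simpa using h), ih]

lemma pvFlatSplit {α β γ : Type} (l : List α) (f : α → List β) (P : β → Bool) (h : β → γ) :
    ((l.flatMap f).filter P).map h = l.flatMap (fun x => ((f x).filter P).map h) := by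
  induction l <;> simp [*]

lemma pvASplit (g : List Int) (l : List Int) :
    ((l.flatMap (fun r => PySem.List.combinations g r.toNat)).filter
        (fun d => decide (1 < PySem.List.len d))).map pvProdA
    = l.flatMap (fun r => pvSeqA g r.toNat) :=
  pvFlatSplit l (fun r => PySem.List.combinations g r.toNat)
    (fun d => decide (1 < PySem.List.len d)) pvProdA

lemma pvSeqA_one (g : List Int) : pvSeqA g 1 = [] := by
  rw [pvSeqA, PySem.List.combinations_one]
  rw [List.filter_eq_nil_iff.mpr (by
    intro d hd
    obtain ⟨x, _, rfl⟩ := List.mem_map.mp hd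
    simp [PySem.List.len])]
  rfl

lemma pvSeqA_succ (g : List Int) (r : Nat) :
    pvSeqA g (r + 2) = (pvLayer g (r + 2)).map Prod.snd := by
  rw [pvSeqA, List.filter_eq_self.mpr (by
    intro d hd
    have := PySem.List.length_of_mem_combinations hd
    simp [PySem.List.len, this]
    omega)]
  have hco : PySem.List.combinations g (r + 2)
      = (PySem.List.combinations (pvRng g) (r + 2)).map (List.map (pvGetD g)) := by
    conv_lhs => rw [pvG_eq g]
    exact PySem.List.combinations_map (pvGetD g) (pvRng g) (r + 2)
  rw [hco, List.map_map, pvLayer, List.map_map]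
  apply List.map_congr_left
  intro c hc
  have hcne : c ≠ [] := pvNonempty_of_mem_comb hc
  have hdne : c.map (pvGetD g) ≠ [] := by simp [hcne]
  simp only [Function.comp_def]
  rw [show pvProdA (c.map (pvGetD g)) = (c.map (pvGetD g)).foldl (· * ·) 1 from
    pvProdA_eq _ hdne]
  rfl

theorem pv_main (g : List Int) : generate_spanning_set g = generate_spanning_set_alt g := by
  show ((PySem.List.pyRange 1 (PySem.List.len g + 1)).foldl
      (fun all_combinations r => all_combinations ++ PySem.List.combinations g r.toNat) []).foldl
      (fun product_combo d =>
        if 1 < PySem.List.len d then PySem.Set.add product_combo (pvProdA d) else product_combo)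
      PySem.Set.empty
    = ((PySem.List.pyRange 2 (PySem.List.len g + 1)).foldl
        (fun st _ =>
          st.2.foldl
            (fun st' ip =>
              (PySem.List.pyRange (ip.1 + 1) (PySem.List.len g)).foldl
                (fun st'' j =>
                  (PySem.Set.add st''.1 (ip.2 * PySem.List.pyGetD g j 0),
                   st''.2 ++ [(j, ip.2 * PySem.List.pyGetD g j 0)]))
                st')
            (st.1, ([] : List (Int × Int))))
        (PySem.Set.empty, PySem.List.enumerate g)).1
  rw [PySem.List.foldl_append_eq_flatMap, List.nil_append, pvFoldIf, pvOuterFold,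
    pvEnumerate_eq, pvASplit]
  congr 1
  rcases hn : g.length with _ | m
  · rw [PySem.List.len, hn]
    rfl
  · have hlen : PySem.List.len g = ((m : Int) + 1) := by rw [PySem.List.len, hn]; push_cast; ring
    rw [hlen, PySem.List.pyRange_one 1 ((m : Int) + 1 + 1),
      show ((m : Int) + 1 + 1 - 1).toNat = m + 1 by omega, List.flatMap_map,
      PySem.List.length_pyRange_one, show ((m : Int) + 1 + 1 - 2).toNat = m by omega,
      pvChain_layer g m 0, List.range_succ_eq_map, List.flatMap_cons, List.flatMap_map,
      show ((1 : Int) + (0 : Nat)).toNat = 1 by omega, pvSeqA_one g, List.nil_append]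
    apply List.flatMap_congr
    intro t ht
    rw [show ((1 : Int) + ((t + 1 : Nat) : Int)).toNat = t + 2 by omega, pvSeqA_succ,
      show 2 + t = t + 2 by omega]

-- ===== VERDICT (by name: the statement is the Claim_ definition above) =====
theorem generate_spanning_set_spec : Claim_equal_generate_spanning_set := by
  intro g _
  exact pv_main g
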